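-- pv_equiv track=rewrite | github.com/parahatreis/ai-wireframer | ai/app/utils/linter.py | check_landmarks
-- ===== SOURCE A (Python) =====
-- from typing import Dict, Any, Tuple, List
--
-- def check_landmarks(pages: List[Dict[str, Any]]) -> int:
--     """
--     Check required landmarks present.
--     Returns 0-10 points.
--     """
--     score = 10
--
--     # Check each page has nav
--     for page in pages:
--         sections = page.get("sections", [])
--         section_kinds = [s.get("kind") for s in sections]
--
--         if "nav" not in section_kinds:
--             score -= 5
--             break
--
--     # Check at least one page has footer (for web)
--     has_footer = False
--     for page in pages:
--         sections = page.get("sections", [])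
--         section_kinds = [s.get("kind") for s in sections]
--         if "footer" in section_kinds:
--             has_footer = True
--             break
--
--     if not has_footer:
--         score -= 2  # Minor deduction, not all apps need footer
--
--     return max(0, score)
-- ===== SOURCE B (Python) =====
-- def check_landmarks(pages):
--     """One pass over pages maintaining two booleans instead of two scan loops."""
--     missing_nav = False
--     has_footer = False
--     for page in pages:
--         kinds = [s.get("kind") for s in page.get("sections", [])]
--         if "nav" not in kinds:
--             missing_nav = True
--         if "footer" in kinds:
--             has_footer = True
--     score = 10 - (5 if missing_nav else 0) - (0 if has_footer else 2)
--     return max(0, score)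
-- ===== Notes on version B (the rewrite author's own statement) =====
-- stated objective: alternative
-- what changed: Replaces A's two separate early-break scans over pages with one single pass that maintains two booleans (missing_nav, has_footer) and computes the score arithmetically afterwards.
import Mathlib
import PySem

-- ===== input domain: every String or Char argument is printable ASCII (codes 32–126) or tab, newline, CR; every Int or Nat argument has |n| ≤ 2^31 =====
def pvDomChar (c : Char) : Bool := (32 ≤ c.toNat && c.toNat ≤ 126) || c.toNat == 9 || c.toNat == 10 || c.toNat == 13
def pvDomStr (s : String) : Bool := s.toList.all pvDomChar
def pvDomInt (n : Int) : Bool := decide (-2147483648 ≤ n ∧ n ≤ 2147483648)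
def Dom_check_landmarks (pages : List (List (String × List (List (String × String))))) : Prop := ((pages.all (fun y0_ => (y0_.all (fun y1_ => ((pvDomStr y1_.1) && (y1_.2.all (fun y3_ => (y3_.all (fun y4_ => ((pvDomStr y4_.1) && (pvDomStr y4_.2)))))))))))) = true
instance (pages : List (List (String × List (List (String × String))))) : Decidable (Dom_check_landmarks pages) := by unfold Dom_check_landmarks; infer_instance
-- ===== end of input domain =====

-- B replaces A's two separate early-break scans over pages with one single pass that
-- maintains two booleans; same O(n·m) cost (objective: alternative decomposition).

-- ===== PORT A =====
-- section_kinds = [s.get("kind") for s in page.get("sections", [])]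
def pvKinds (page : List (String × List (List (String × String)))) : List (Option String) :=
  (PySem.Dict.getD (PySem.Dict.mk page) "sections" []).map (fun s => PySem.Dict.get? (PySem.Dict.mk s) "kind")

-- first loop: 'for page in pages: … if "nav" not in section_kinds: score -= 5; break'
def pvNavLoop : List (List (String × List (List (String × String)))) → Int
  | [] => 0
  | p :: rest => if (pvKinds p).contains (some "nav") then pvNavLoop rest else -5

-- second loop: 'for page in pages: … if "footer" in section_kinds: has_footer = True; break'
def pvFooterLoop : List (List (String × List (List (String × String)))) → Bool
  | [] => false
  | p :: rest => if (pvKinds p).contains (some "footer") then true else pvFooterLoop rest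

def check_landmarks (pages : List (List (String × List (List (String × String))))) : Int :=
  let score : Int := 10 + pvNavLoop pages
  let has_footer := pvFooterLoop pages
  let score := if has_footer then score else score - 2
  max 0 score

-- ===== PORT B =====
-- kinds = [s.get("kind") for s in page.get("sections", [])]  (B's own copy of the comprehension)
def pvKindsB (page : List (String × List (List (String × String)))) : List (Option String) :=
  (PySem.Dict.getD (PySem.Dict.mk page) "sections" []).map (fun s => PySem.Dict.get? (PySem.Dict.mk s) "kind")

def check_landmarks_alt (pages : List (List (String × List (List (String × String))))) : Int :=
  let st := pages.foldl
    (fun (st : Bool × Bool) p =>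
      let kinds := pvKindsB p
      ((if !(kinds.contains (some "nav")) then true else st.1),
       (if kinds.contains (some "footer") then true else st.2)))
    (false, false)
  let score : Int := 10 - (if st.1 then 5 else 0) - (if st.2 then 0 else 2)
  max 0 score

-- ===== PRECONDITION & SPEC =====
def Spec_check_landmarks (pages : List (List (String × List (List (String × String))))) (out : Int) : Prop := out = check_landmarks_alt pages
instance (pages : List (List (String × List (List (String × String))))) (out : Int) : Decidable (Spec_check_landmarks pages out) := by unfold Spec_check_landmarks; infer_instance

-- ===== CLAIM (what is proved, stated in full; the proofs are below) =====
def Claim_equal_check_landmarks : Prop := ∀ (pages : List (List (String × List (List (String × String))))), Dom_check_landmarks pages → Spec_check_landmarks pages (check_landmarks pages)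

-- ===== LEMMAS AND PROOFS =====

theorem pvKindsB_eq (p : List (String × List (List (String × String)))) : pvKindsB p = pvKinds p := rfl

theorem pvFold_eq (pages : List (List (String × List (List (String × String))))) (a b : Bool) :
    pages.foldl
      (fun (st : Bool × Bool) p =>
        let kinds := pvKindsB p
        ((if !(kinds.contains (some "nav")) then true else st.1),
         (if kinds.contains (some "footer") then true else st.2)))
      (a, b)
    = (a || pages.any (fun p => !((pvKindsB p).contains (some "nav"))),
       b || pages.any (fun p => (pvKindsB p).contains (some "footer"))) := by
  induction pages generalizing a b with
  | nil => simp
  | cons p rest ih =>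
    simp only [List.foldl_cons, List.any_cons, ih]
    by_cases h1 : some "nav" ∈ pvKindsB p <;>
      by_cases h2 : some "footer" ∈ pvKindsB p <;> simp [h1, h2]

theorem pvNavLoop_eq (pages : List (List (String × List (List (String × String))))) :
    pvNavLoop pages = if pages.any (fun p => !((pvKinds p).contains (some "nav"))) then -5 else 0 := by
  induction pages with
  | nil => simp [pvNavLoop]
  | cons p rest ih =>
    simp only [pvNavLoop, List.any_cons]
    by_cases h : some "nav" ∈ pvKinds p <;> simp [h, ih]

theorem pvFooterLoop_eq (pages : List (List (String × List (List (String × String))))) :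
    pvFooterLoop pages = pages.any (fun p => (pvKinds p).contains (some "footer")) := by
  induction pages with
  | nil => simp [pvFooterLoop]
  | cons p rest ih =>
    simp only [pvFooterLoop, List.any_cons]
    by_cases h : some "footer" ∈ pvKinds p <;> simp [h, ih]

-- ===== VERDICT (by name: the statement is the Claim_ definition above) =====
theorem check_landmarks_spec : Claim_equal_check_landmarks := by
  intro pages _
  unfold Spec_check_landmarks check_landmarks check_landmarks_alt
  rw [pvFold_eq, pvNavLoop_eq, pvFooterLoop_eq]
  simp only [pvKindsB_eq, Bool.false_or]
  cases hn : pages.any (fun p => !((pvKinds p).contains (some "nav"))) <;>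
    cases hf : pages.any (fun p => (pvKinds p).contains (some "footer")) <;> norm_num
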